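-- pv_equiv track=rewrite | github.com/TrellixVulnTeam/screening-fist_OO2T | data/pretraining/scripts/uniprot_to_json.py | read_stdin
-- ===== SOURCE A (Python) =====
-- def read_stdin(stdin):
--     entry = ''
--     for line in stdin:
--         if line[0:2] != '//':
--             entry = ''.join([entry,line])
--         else:
--             yield entry
--             entry = ''
-- ===== SOURCE B (Python) =====
-- def read_stdin(stdin):
--     # Partition the lines into segments between '//' delimiter lines first,
--     # then join and emit every segment except the trailing one.
--     parts = [[]]
--     for line in stdin:
--         if line[0:2] == '//':
--             parts.append([])
--         else:
--             parts[-1].append(line)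
--     for part in parts[:-1]:
--         yield ''.join(part)
-- ===== Notes on version B (the rewrite author's own statement) =====
-- stated objective: faster
-- what changed: Instead of re-joining a growing accumulator string at every line and yielding it at each '//' (quadratic copying), B partitions the lines into a list of line-segments in one pass and then joins and yields every segment except the trailing one.
import Mathlib
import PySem

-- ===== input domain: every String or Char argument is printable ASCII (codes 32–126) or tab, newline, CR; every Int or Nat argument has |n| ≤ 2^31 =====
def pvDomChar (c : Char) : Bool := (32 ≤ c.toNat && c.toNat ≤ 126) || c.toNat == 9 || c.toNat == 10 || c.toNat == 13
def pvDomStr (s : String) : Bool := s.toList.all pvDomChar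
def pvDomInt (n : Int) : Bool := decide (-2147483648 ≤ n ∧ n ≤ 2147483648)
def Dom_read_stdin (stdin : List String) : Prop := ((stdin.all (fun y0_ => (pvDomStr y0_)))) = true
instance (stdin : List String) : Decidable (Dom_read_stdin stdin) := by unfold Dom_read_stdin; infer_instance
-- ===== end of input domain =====

-- B partitions the lines into segments between '//' delimiter lines and joins each segment once,
-- instead of A's string accumulator re-joined at every line (objective: faster, measured).


-- ===== PORT A =====
-- loop body of A: state = (yielded entries so far, current `entry` accumulator)
def pvStepA (s : List String × String) (line : String) : List String × String :=
  if PySem.Str.slice line (some 0) (some 2) ≠ "//"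
  then (s.1, PySem.Str.join "" [s.2, line])           -- entry = ''.join([entry, line])
  else (s.1 ++ [s.2], "")                             -- yield entry; entry = ''

def read_stdin (stdin : List String) : List String :=
  (stdin.foldl pvStepA ([], "")).1

-- ===== PORT B =====
-- loop body of B: parts[-1].append(line) / parts.append([])
def pvStepB (parts : List (List String)) (line : String) : List (List String) :=
  if PySem.Str.slice line (some 0) (some 2) == "//"
  then parts ++ [[]]
  else parts.dropLast ++ [parts.getLastD [] ++ [line]]

def read_stdin_alt (stdin : List String) : List String :=
  ((stdin.foldl pvStepB [[]]).dropLast).map (fun part => PySem.Str.join "" part)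

-- ===== PRECONDITION & SPEC =====
def Spec_read_stdin (stdin : List String) (out : List String) : Prop := out = read_stdin_alt stdin
instance (stdin : List String) (out : List String) : Decidable (Spec_read_stdin stdin out) := by unfold Spec_read_stdin; infer_instance

-- ===== CLAIM (what is proved, stated in full; the proofs are below) =====
def Claim_equal_read_stdin : Prop := ∀ (stdin : List String), Dom_read_stdin stdin → Spec_read_stdin stdin (read_stdin stdin)

-- ===== LEMMAS AND PROOFS =====
-- ''.join over List Char concatenates (specialisation of PySem.Chars.join to the empty separator)
theorem pvCharsJoin_concat (l : List (List Char)) (x : List Char) :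
    PySem.Chars.join [] (l ++ [x]) = PySem.Chars.join [] l ++ x := by
  induction l with
  | nil => simp [PySem.Chars.join_nil, PySem.Chars.join_singleton]
  | cons a t ih =>
    cases t with
    | nil => simp [PySem.Chars.join_singleton, PySem.Chars.join_cons_cons]
    | cons b t2 => simp [PySem.Chars.join_cons_cons] at *; simp [ih]

-- ''.join([''.join(p), line]) = ''.join(p + [line])
theorem pvJoin_snoc (p : List String) (x : String) :
    PySem.Str.join "" [PySem.Str.join "" p, x] = PySem.Str.join "" (p ++ [x]) := by
  apply String.toList_inj.mp
  simp [pysem, pvCharsJoin_concat, PySem.Chars.join_cons_cons, PySem.Chars.join_singleton]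

-- loop invariant relating A's (yielded, entry) state to B's partition state
theorem pvInv (lines : List String) : ∀ parts : List (List String), parts ≠ [] →
    lines.foldl pvStepA
        ((parts.dropLast).map (fun part => PySem.Str.join "" part),
         PySem.Str.join "" (parts.getLastD [])) =
      (((lines.foldl pvStepB parts).dropLast).map (fun part => PySem.Str.join "" part),
       PySem.Str.join "" ((lines.foldl pvStepB parts).getLastD [])) := by
  induction lines with
  | nil => intro parts _; simp
  | cons line rest ih =>
    intro parts hne
    simp only [List.foldl_cons]
    by_cases h : PySem.Str.slice line (some 0) (some 2) = "//"
    · have hA : pvStepA ((parts.dropLast).map (fun part => PySem.Str.join "" part),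
          PySem.Str.join "" (parts.getLastD []))
          line = ((parts.dropLast).map (fun part => PySem.Str.join "" part)
            ++ [PySem.Str.join "" (parts.getLastD [])], "") := by
        simp [pvStepA, h]
      have hB : pvStepB parts line = parts ++ [[]] := by simp [pvStepB, h]
      have hlastD : parts.getLastD [] = parts.getLast hne := by
        rw [List.getLastD_eq_getLast?, List.getLast?_eq_some_getLast hne]; rfl
      have hmap : (parts.dropLast).map (fun part => PySem.Str.join "" part)
          ++ [PySem.Str.join "" (parts.getLastD [])]
          = parts.map (fun part => PySem.Str.join "" part) := by
        conv_rhs => rw [← List.dropLast_append_getLast hne]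
        rw [List.map_append, hlastD]; rfl
      rw [hA, hB, hmap]
      have hrec := ih (parts ++ [[]]) (by simp)
      rw [List.dropLast_concat, List.getLastD_concat] at hrec
      have hnil : PySem.Str.join "" ([] : List String) = "" := by decide
      rw [hnil] at hrec
      exact hrec
    · have hA : pvStepA ((parts.dropLast).map (fun part => PySem.Str.join "" part),
          PySem.Str.join "" (parts.getLastD []))
          line = ((parts.dropLast).map (fun part => PySem.Str.join "" part),
            PySem.Str.join "" (parts.getLastD [] ++ [line])) := by
        simp [pvStepA, h, pvJoin_snoc]
      have hB : pvStepB parts line = parts.dropLast ++ [parts.getLastD [] ++ [line]] := by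
        simp [pvStepB, h]
      rw [hA, hB]
      have hrec := ih (parts.dropLast ++ [parts.getLastD [] ++ [line]]) (by simp)
      rw [List.dropLast_concat, List.getLastD_concat] at hrec
      exact hrec

-- ===== VERDICT (by name: the statement is the Claim_ definition above) =====
theorem read_stdin_spec : Claim_equal_read_stdin := by
  intro stdin _
  unfold Spec_read_stdin read_stdin read_stdin_alt
  have h := pvInv stdin [[]] (by simp)
  have e1 : (([[]] : List (List String)).dropLast).map (fun part => PySem.Str.join "" part) = [] := rfl
  have e2 : PySem.Str.join "" (([[]] : List (List String)).getLastD []) = "" := by decide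
  rw [e1, e2] at h
  rw [h]
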